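-- pv_equiv track=rewrite | github.com/but80/prime-number-art | _primeart/noise_generator.py | signed_diffuse
-- ===== SOURCE A (Python) =====
-- def signed_diffuse(diffuse):
--     d = []
--     for i in range(0, len(diffuse)):
--         if diffuse[i] != 0:
--             d.append(i)
--     n = 1 << len(d)
--     for i in range(0, n):
--         mask = i
--         r = diffuse[:]
--         for j in range(0, len(d)):
--             if (mask & 1) != 0:
--                 r[d[j]] *= -1
--             mask >>= 1
--         yield r
-- ===== SOURCE B (Python) =====
-- def signed_diffuse(diffuse):
--     idxs = [i for i, v in enumerate(diffuse) if v != 0]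
--
--     def rec(rev):
--         # yields every sign combination over the positions in rev,
--         # with later positions of idxs (earlier in rev) varying slowest
--         if not rev:
--             yield list(diffuse)
--             return
--         yield from rec(rev[1:])
--         for r in rec(rev[1:]):
--             r[rev[0]] = -r[rev[0]]
--             yield r
--
--     yield from rec(list(reversed(idxs)))
-- ===== Notes on version B (the rewrite author's own statement) =====
-- stated objective: alternative
-- what changed: Replaces A's bitmask counter (iterate i in range(2^k), decode bits of i to decide which nonzero positions to flip) by a recursive generator over the reversed nonzero-index list that yields the unflipped block then the flipped block, so no masks or bit operations appear.
import Mathlib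
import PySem

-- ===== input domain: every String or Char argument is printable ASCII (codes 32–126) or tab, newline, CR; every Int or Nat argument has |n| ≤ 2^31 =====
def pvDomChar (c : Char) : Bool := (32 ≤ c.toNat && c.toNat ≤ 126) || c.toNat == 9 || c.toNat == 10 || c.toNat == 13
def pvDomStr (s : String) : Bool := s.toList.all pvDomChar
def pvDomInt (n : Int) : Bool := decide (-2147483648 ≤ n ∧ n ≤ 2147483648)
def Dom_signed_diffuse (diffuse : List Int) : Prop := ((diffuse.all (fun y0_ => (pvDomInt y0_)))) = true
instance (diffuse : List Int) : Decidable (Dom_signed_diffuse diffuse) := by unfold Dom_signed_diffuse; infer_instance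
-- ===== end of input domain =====

-- B replaces A's bitmask counter by a recursive unflipped-block/flipped-block enumeration
-- over the reversed nonzero-index list (objective: alternative algorithm, same output order).
-- Both Pythons are generators; each port returns the list of yielded values.

-- ===== PORT A =====
-- literal transliteration: d-building loop, then for each i in range(1 << len(d))
-- the inner loop walks j over range(len(d)) threading (mask, r); all indices here are
-- nonnegative and in range, so pyGetD/pySetD are exact for xs[·] and xs[·] = v.
def signed_diffuse (diffuse : List Int) : List (List Int) :=
  let d : List Int :=
    (PySem.List.pyRange 0 (PySem.List.len diffuse) 1).foldl
      (fun acc i => if PySem.List.pyGetD diffuse i 0 ≠ 0 then acc ++ [i] else acc) []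
  let n : Int := 1 <<< d.length
  (PySem.List.pyRange 0 n 1).foldl
    (fun out i =>
      let st : Int × List Int :=
        (PySem.List.pyRange 0 (PySem.List.len d) 1).foldl
          (fun (st : Int × List Int) j =>
            let mask := st.1
            let r := st.2
            let r :=
              if PySem.Int.band mask 1 ≠ 0 then
                PySem.List.pySetD r (PySem.List.pyGetD d j 0)
                  ((PySem.List.pyGetD r (PySem.List.pyGetD d j 0) 0) * (-1))
              else r
            (mask >>> (1 : Nat), r))
          (i, PySem.List.slice diffuse none none)
      out ++ [st.2])
    []

-- ===== PORT B =====
-- [i for i, v in enumerate(diffuse) if v != 0]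
def sdIdxs (diffuse : List Int) : List Int :=
  ((PySem.List.enumerate diffuse 0).filter (fun p => p.2 ≠ 0)).map (fun p => p.1)

-- rec(rev): yield the unflipped block, then the same block with position rev[0] negated
def sdRec (diffuse : List Int) : List Int → List (List Int)
  | [] => [diffuse]
  | i :: rest =>
      sdRec diffuse rest ++
        (sdRec diffuse rest).map
          (fun r => PySem.List.pySetD r i (-(PySem.List.pyGetD r i 0)))

def signed_diffuse_alt (diffuse : List Int) : List (List Int) :=
  sdRec diffuse (sdIdxs diffuse).reverse

-- ===== PRECONDITION & SPEC =====
def Spec_signed_diffuse (diffuse : List Int) (out : List (List Int)) : Prop := out = signed_diffuse_alt diffuse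
instance (diffuse : List Int) (out : List (List Int)) : Decidable (Spec_signed_diffuse diffuse out) := by unfold Spec_signed_diffuse; infer_instance

-- ===== CLAIM (what is proved, stated in full; the proofs are below) =====
def Claim_equal_signed_diffuse : Prop := ∀ (diffuse : List Int), Dom_signed_diffuse diffuse → Spec_signed_diffuse diffuse (signed_diffuse diffuse)

-- ===== LEMMAS AND PROOFS =====

-- Nat-level model shared by both directions: flip one position; fold the bits of a mask.
def flipN (r : List Int) (i : Nat) : List Int := r.set i (-(r.getD i 0))

def flipsN (r : List Int) : List Nat → Nat → List Int
  | [], _ => r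
  | i :: rest, m => flipsN (if m % 2 = 1 then flipN r i else r) rest (m / 2)

def dN (diffuse : List Int) : List Nat :=
  (List.range diffuse.length).filter (fun i => diffuse.getD i 0 ≠ 0)

theorem map_range_getD (d : List Int) :
    (List.range d.length).map (fun j => d.getD j 0) = d := by
  apply List.ext_getElem
  · simp
  · intro i h1 h2
    simp [List.getD_eq_getElem?_getD, List.getElem?_eq_getElem h2]

theorem foldl_range_getD {β : Type} (d : List Int) (G : β → Int → β) (init : β) :
    (List.range d.length).foldl (fun st j => G st (d.getD j 0)) init = d.foldl G init := by
  conv_rhs => rw [← map_range_getD d]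
  rw [List.foldl_map]

-- the mask test and shift, on a Nat-cast mask
theorem band_one_cast (m : Nat) : (PySem.Int.band (m : Int) 1 ≠ 0) ↔ (m % 2 = 1) := by
  rw [PySem.Int.band_one, show (2:Int) = ((2:Nat):Int) from rfl, PySem.Int.mod_natCast]
  omega

theorem shiftRight_one_cast (m : Nat) : ((m : Int)) >>> (1 : Nat) = ((m / 2 : Nat) : Int) := by
  simp [Int.shiftRight_eq_div_pow]

-- both ports compute the same nonzero-index list
theorem dlist_eq (diffuse : List Int) :
    (PySem.List.pyRange 0 (PySem.List.len diffuse) 1).foldl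
      (fun acc i => if PySem.List.pyGetD diffuse i 0 ≠ 0 then acc ++ [i] else acc) []
      = (dN diffuse).map (fun (k : Nat) => (k : Int)) := by
  rw [PySem.List.foldl_append_ite_eq_filter, List.nil_append, PySem.List.len_eq,
    PySem.List.pyRange_zero_natCast, List.filter_map, dN]
  simp [Function.comp_def]

theorem sdIdxs_eq (diffuse : List Int) :
    sdIdxs diffuse = (dN diffuse).map (fun (k : Nat) => (k : Int)) := by
  rw [sdIdxs, PySem.List.enumerate_eq_map_pyRange (d := 0), PySem.List.len_eq,
    PySem.List.pyRange_zero_natCast, List.map_map, List.filter_map, List.map_map, dN]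
  simp [Function.comp_def]

-- A's inner loop over d equals flipsN
theorem innerA_eq (dNat : List Nat) (m : Nat) (r : List Int) :
    ((PySem.List.pyRange 0 (PySem.List.len (dNat.map (fun (k : Nat) => (k : Int)))) 1).foldl
        (fun (st : Int × List Int) j =>
          let mask := st.1
          let r := st.2
          let r :=
            if PySem.Int.band mask 1 ≠ 0 then
              PySem.List.pySetD r (PySem.List.pyGetD (dNat.map (fun (k : Nat) => (k : Int))) j 0)
                ((PySem.List.pyGetD r
                  (PySem.List.pyGetD (dNat.map (fun (k : Nat) => (k : Int))) j 0) 0) * (-1))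
            else r
          (mask >>> (1 : Nat), r))
        ((m : Int), r))
      = (((m / 2 ^ dNat.length : Nat) : Int), flipsN r dNat m) := by
  rw [PySem.List.len_eq, PySem.List.pyRange_zero_natCast, List.foldl_map]
  simp only [PySem.List.pyGetD_natCast]
  rw [foldl_range_getD (dNat.map (fun (k : Nat) => (k : Int)))
    (fun (st : Int × List Int) (x : Int) =>
      ((st.1 >>> (1:Nat)),
        if PySem.Int.band st.1 1 ≠ 0 then
          PySem.List.pySetD st.2 x ((PySem.List.pyGetD st.2 x 0) * (-1)) else st.2))]
  rw [List.foldl_map]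
  induction dNat generalizing m r with
  | nil => simp [flipsN]
  | cons i rest ih =>
      simp only [List.foldl_cons, flipsN, List.length_cons]
      rw [shiftRight_one_cast]
      by_cases h : m % 2 = 1
      · rw [if_pos ((band_one_cast m).mpr h), if_pos h, ih]
        simp only [PySem.List.pySetD_natCast, PySem.List.pyGetD_natCast, mul_neg_one, flipN]
        congr 2
        rw [pow_succ']
        exact Nat.div_div_eq_div_mul m 2 _
      · rw [if_neg (fun hc => h ((band_one_cast m).mp hc)), if_neg h, ih]
        congr 2
        rw [pow_succ']
        exact Nat.div_div_eq_div_mul m 2 _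

-- flipsN only reads the low bits of the mask
theorem flipsN_add_pow (r : List Int) (l : List Nat) (m : Nat) :
    flipsN r l (m + 2 ^ l.length) = flipsN r l m := by
  induction l generalizing r m with
  | nil => rfl
  | cons a tl ih =>
      simp only [flipsN, List.length_cons, pow_succ]
      have h1 : (m + 2 ^ tl.length * 2) % 2 = m % 2 := by omega
      have h2 : (m + 2 ^ tl.length * 2) / 2 = m / 2 + 2 ^ tl.length := by omega
      rw [h1, h2, ih]

-- the last list entry reads the top bit, applied after the rest
theorem flipsN_snoc (r : List Int) (l : List Nat) (a : Nat) (m : Nat) :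
    flipsN r (l ++ [a]) m =
      if (m / 2 ^ l.length) % 2 = 1 then flipN (flipsN r l m) a else flipsN r l m := by
  induction l generalizing r m with
  | nil => simp [flipsN]
  | cons b tl ih =>
      simp only [List.cons_append, flipsN, List.length_cons, ih]
      have : m / 2 / 2 ^ tl.length = m / 2 ^ (tl.length + 1) := by
        rw [Nat.div_div_eq_div_mul, pow_succ']
      rw [this]

-- B's recursion equals the list of flipsN over all masks, first position varying fastest
theorem sdRecN_eq (diffuse : List Int) (rev : List Nat) :
    sdRec diffuse (rev.map (fun (k : Nat) => (k : Int))) =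
      (List.range (2 ^ rev.length)).map (fun m => flipsN diffuse rev.reverse m) := by
  induction rev with
  | nil => simp [sdRec, flipsN]
  | cons i rest ih =>
      have hlen : rest.reverse.length = rest.length := by simp
      simp only [List.map_cons, sdRec, ih, List.length_cons, List.reverse_cons]
      have hsplit : (2 : Nat) ^ (rest.length + 1) = 2 ^ rest.length + 2 ^ rest.length := by
        rw [pow_succ]; omega
      rw [hsplit, List.range_add, List.map_append, List.map_map]
      congr 1
      · apply List.map_congr_left
        intro m hm
        have hm' : m < 2 ^ rest.length := List.mem_range.mp hm
        rw [flipsN_snoc, hlen, Nat.div_eq_of_lt hm']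
        simp
      · rw [List.map_map]
        apply List.map_congr_left
        intro m hm
        have hm' : m < 2 ^ rest.length := List.mem_range.mp hm
        simp only [Function.comp_def]
        rw [flipsN_snoc, hlen]
        have hd : (2 ^ rest.length + m) / 2 ^ rest.length = 1 := by
          rw [Nat.add_div_left m (Nat.two_pow_pos rest.length), Nat.div_eq_of_lt hm']
        rw [hd, if_pos rfl]
        have hlow := flipsN_add_pow diffuse rest.reverse m
        rw [hlen] at hlow
        rw [Nat.add_comm, hlow]
        simp [flipN, PySem.List.pySetD_natCast, PySem.List.pyGetD_natCast]

theorem signed_diffuse_eq_model (diffuse : List Int) :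
    signed_diffuse diffuse =
      (List.range (2 ^ (dN diffuse).length)).map (fun m => flipsN diffuse (dN diffuse) m) := by
  unfold signed_diffuse
  simp only [dlist_eq]
  rw [show ((1 <<< ((dN diffuse).map (fun (k : Nat) => (k : Int))).length : Nat))
        = (2 ^ (dN diffuse).length : Nat) by
      simp [Nat.shiftLeft_eq]]
  rw [PySem.List.pyRange_zero_natCast, List.foldl_map,
    PySem.List.foldl_append_singleton_eq_map, List.nil_append]
  apply List.map_congr_left
  intro m hm
  simp only [PySem.List.slice_none_none]
  rw [innerA_eq]

theorem signed_diffuse_alt_eq_model (diffuse : List Int) :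
    signed_diffuse_alt diffuse =
      (List.range (2 ^ (dN diffuse).length)).map (fun m => flipsN diffuse (dN diffuse) m) := by
  rw [signed_diffuse_alt, sdIdxs_eq, ← List.map_reverse, sdRecN_eq]
  simp

-- ===== VERDICT (by name: the statement is the Claim_ definition above) =====
theorem signed_diffuse_spec : Claim_equal_signed_diffuse := by
  intro diffuse _
  unfold Spec_signed_diffuse
  rw [signed_diffuse_eq_model, signed_diffuse_alt_eq_model]
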